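-- pv_equiv track=rewrite | github.com/boringlee24/HPCA22_SuperCloud | util.py | find
-- ===== SOURCE A (Python) =====
-- def find(series1):
--     ans=[]
--     current_len=0 #current_len acts like prev_zero_flag flag
--     for val in series1:
--         if val<1:
--             current_len+=1
--         elif val>=1 and current_len!=0:
--             ans.append(current_len)
--             current_len=0
--     if current_len!=0:
--         ans.append(current_len)
--     return ans
-- ===== SOURCE B (Python) =====
-- def find(series1):
--     res = []
--     i, n = 0, len(series1)
--     while i < n:
--         if series1[i] < 1:
--             j = i + 1
--             while j < n and series1[j] < 1:
--                 j += 1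
--             res.append(j - i)
--             i = j
--         else:
--             i += 1
--     return res
-- ===== Notes on version B (the rewrite author's own statement) =====
-- stated objective: alternative
-- what changed: Replaces A's running counter with end-of-run flush by a two-pointer run scanner: on meeting a value < 1 it scans ahead to the end of that run and emits its length directly, so no pending-counter state or trailing flush exists.
import Mathlib
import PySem

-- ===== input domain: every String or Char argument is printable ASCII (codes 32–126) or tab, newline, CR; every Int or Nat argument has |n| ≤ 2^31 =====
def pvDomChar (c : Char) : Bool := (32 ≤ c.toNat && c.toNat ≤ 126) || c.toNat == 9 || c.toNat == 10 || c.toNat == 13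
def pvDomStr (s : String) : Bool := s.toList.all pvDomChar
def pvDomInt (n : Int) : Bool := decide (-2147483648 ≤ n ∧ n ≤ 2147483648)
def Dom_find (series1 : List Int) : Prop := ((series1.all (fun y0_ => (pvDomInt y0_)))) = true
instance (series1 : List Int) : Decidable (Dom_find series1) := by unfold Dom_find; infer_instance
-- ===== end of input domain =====

-- B replaces A's running counter + trailing flush by a run scanner that, at the start of each
-- run of values < 1, scans ahead to the run's end and emits its length directly (alternative
-- decomposition, same cost).


-- ===== PORT A =====
-- literal transliteration: fold over series1 carrying (ans, current_len), then the trailing flush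
def find (series1 : List Int) : List Int :=
  let st := series1.foldl
    (fun (st : List Int × Int) val =>
      if val < 1 then (st.1, st.2 + 1)
      else if 1 ≤ val ∧ st.2 ≠ 0 then (st.1 ++ [st.2], 0)
      else st)
    ([], 0)
  if st.2 ≠ 0 then st.1 ++ [st.2] else st.1

-- ===== PORT B =====
-- run scanner: at a value < 1, measure the whole run (scan ahead) and continue past it
def find_alt (series1 : List Int) : List Int :=
  match series1 with
  | [] => []
  | x :: xs =>
    if x < 1 then
      ((xs.takeWhile (fun v => v < 1)).length + 1 : Int) ::
        find_alt (xs.dropWhile (fun v => v < 1))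
    else find_alt xs
termination_by series1.length
decreasing_by
  · exact Nat.lt_succ_of_le (xs.length_dropWhile_le _)
  · simp

-- ===== PRECONDITION & SPEC =====
def Spec_find (series1 : List Int) (out : List Int) : Prop := out = find_alt series1
instance (series1 : List Int) (out : List Int) : Decidable (Spec_find series1 out) := by unfold Spec_find; infer_instance

-- ===== CLAIM (what is proved, stated in full; the proofs are below) =====
def Claim_equal_find : Prop := ∀ (series1 : List Int), Dom_find series1 → Spec_find series1 (find series1)

-- ===== LEMMAS AND PROOFS =====

-- the pending-run continuation B's shape induces when A's counter is c > 0
def pendRun (c : Int) (l : List Int) : List Int :=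
  (c + ((l.takeWhile (fun v => v < 1)).length : Int)) ::
    find_alt (l.dropWhile (fun v => v < 1))

-- loop invariant: A's fold-from-state (ans, c) followed by the flush equals ans ++ (B's remainder)
theorem find_inv (l : List Int) : ∀ (ans : List Int) (c : Int), 0 ≤ c →
    (let st := l.foldl
        (fun (st : List Int × Int) val =>
          if val < 1 then (st.1, st.2 + 1)
          else if 1 ≤ val ∧ st.2 ≠ 0 then (st.1 ++ [st.2], 0)
          else st)
        (ans, c)
     if st.2 ≠ 0 then st.1 ++ [st.2] else st.1)
    = ans ++ (if c = 0 then find_alt l else pendRun c l) := by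
  induction l with
  | nil =>
    intro ans c hc
    by_cases h : c = 0 <;> simp [h, find_alt, pendRun]
  | cons x xs ih =>
    intro ans c hc
    by_cases hx : x < 1
    · have h1 : ¬ (c + 1 = 0) := by omega
      simp only [List.foldl_cons, if_pos hx]
      rw [ih ans (c + 1) (by omega)]
      by_cases h : c = 0
      · simp [h, find_alt, hx, pendRun]
        omega
      · simp [h, h1, pendRun, hx]
        omega
    · have hx1 : 1 ≤ x := by omega
      by_cases h : c = 0
      · simp only [List.foldl_cons, if_neg hx, h]
        simp only [ne_eq, not_true_eq_false, and_false, if_false]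
        rw [ih ans 0 le_rfl]
        simp [find_alt, hx]
      · simp only [List.foldl_cons, if_neg hx,
          if_pos (show 1 ≤ x ∧ c ≠ 0 from ⟨hx1, h⟩)]
        rw [ih (ans ++ [c]) 0 le_rfl]
        simp [pendRun, hx, find_alt, h]

-- ===== VERDICT (by name: the statement is the Claim_ definition above) =====
theorem find_spec : Claim_equal_find := by
  intro series1 _
  unfold Spec_find find
  have h := find_inv series1 [] 0 le_rfl
  simpa using h
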